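-- pv_equiv track=rewrite | github.com/akretion/carrier-delivery-colipostefr | delivery_carrier_label_so_colissimo/report/label.py | _build_control_key
-- ===== SOURCE A (Python) =====
-- def _build_control_key(key):
--     #remove space
--     key = key.replace(' ', '')
--     # reverse string order
--     key = key[::-1]
--     pair, odd = [], []
--     sum_pair, sum_odd = 0, 0
--     my_count = 0
--     for arg in key:
--         my_count += 1
--         if my_count % 2 == 0:
--             pair.append(arg)
--         else:
--             odd.append(arg)
--
--     for number in odd:
--         sum_odd += int(number)
--     for number in pair:
--         sum_pair += int(number)
--
--     my_sum = sum_odd * 3 + sum_pair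
--     result = (my_sum // 10 + 1) * 10 - my_sum
--     if result == 10:
--         result = 0
--     return str(result)
-- ===== SOURCE B (Python) =====
-- def _build_control_key(key):
--     digits = key.replace(' ', '')[::-1]
--     my_sum = 0
--     for i, ch in enumerate(digits):
--         my_sum += int(ch) * 3 if i % 2 == 0 else int(ch)
--     result = (my_sum // 10 + 1) * 10 - my_sum
--     return str(0 if result == 10 else result)
-- ===== Notes on version B (the rewrite author's own statement) =====
-- stated objective: simpler
-- what changed: Replaced the three passes (partition into pair/odd lists, then two separate summing loops) by a single enumerate pass over the reversed despaced string that accumulates one weighted running sum.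
import Mathlib
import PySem

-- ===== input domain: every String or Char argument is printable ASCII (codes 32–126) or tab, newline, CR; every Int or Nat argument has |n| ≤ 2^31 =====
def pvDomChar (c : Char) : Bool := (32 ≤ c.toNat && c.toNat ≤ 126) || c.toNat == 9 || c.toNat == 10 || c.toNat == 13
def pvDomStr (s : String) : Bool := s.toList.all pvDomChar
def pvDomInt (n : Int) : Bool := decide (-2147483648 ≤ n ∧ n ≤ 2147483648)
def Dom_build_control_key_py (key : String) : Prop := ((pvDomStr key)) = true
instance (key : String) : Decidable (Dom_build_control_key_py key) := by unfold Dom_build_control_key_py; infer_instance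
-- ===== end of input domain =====

-- B replaces A's three passes (partition into pair/odd lists, two summing loops) by one
-- weighted single-pass accumulation over the reversed despaced string; objective: simpler.

-- int(ch) for a one-character string ch (under Pre_ the character is a digit, so ofChars? is some)
def pvVal (c : Char) : Int := (PySem.Int.ofChars? [c]).getD 0

-- ===== PORT A =====
-- the first for-loop: state (pair, odd, my_count)
def pvALoop : List Char → List Char × List Char × Nat → List Char × List Char × Nat
  | [], st => st
  | c :: t, (pair, odd, cnt) =>
      if (cnt + 1) % 2 == 0 then pvALoop t (pair ++ [c], odd, cnt + 1)
      else pvALoop t (pair, odd ++ [c], cnt + 1)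

def build_control_key_py (key : String) : String :=
  let k := PySem.Str.replace key " " ""
  let k := (PySem.Str.slice? k none none (-1)).getD ""   -- key[::-1]; step -1 ≠ 0 so never none
  let st := pvALoop k.toList ([], [], 0)
  let pair := st.1
  let odd := st.2.1
  let sum_odd := odd.foldl (fun s c => s + pvVal c) 0
  let sum_pair := pair.foldl (fun s c => s + pvVal c) 0
  let my_sum := sum_odd * 3 + sum_pair
  let result := (PySem.Int.floordiv my_sum 10 + 1) * 10 - my_sum
  let result := if result == 10 then 0 else result
  PySem.Int.toStr result

-- ===== PORT B =====
-- the single enumerate loop: index i, running sum s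
def pvBLoop : List Char → Nat → Int → Int
  | [], _, s => s
  | c :: t, i, s => pvBLoop t (i + 1) (s + (if i % 2 == 0 then pvVal c * 3 else pvVal c))

def build_control_key_py_alt (key : String) : String :=
  let digits := (PySem.Str.slice? (PySem.Str.replace key " " "") none none (-1)).getD ""
  let my_sum := pvBLoop digits.toList 0 0
  let result := (PySem.Int.floordiv my_sum 10 + 1) * 10 - my_sum
  PySem.Int.toStr (if result == 10 then 0 else result)

-- ===== PRECONDITION & SPEC =====
-- Pre_ excludes inputs containing a character other than a digit or space: there A's
-- int(ch) raises ValueError (A returns on exactly the digit/space strings).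
def Pre_build_control_key_py (key : String) : Prop :=
  key.toList.all (fun c => c == ' ' || c.isDigit) = true
instance (key : String) : Decidable (Pre_build_control_key_py key) := by
  unfold Pre_build_control_key_py; infer_instance

def pvWitness_build_control_key_py : String := "97 802"

def Spec_build_control_key_py (key : String) (out : String) : Prop := out = build_control_key_py_alt key
instance (key : String) (out : String) : Decidable (Spec_build_control_key_py key out) := by unfold Spec_build_control_key_py; infer_instance

-- ===== CLAIM (what is proved, stated in full; the proofs are below) =====
def Claim_equal_build_control_key_py : Prop := ∀ (key : String), Dom_build_control_key_py key → Pre_build_control_key_py key → Spec_build_control_key_py key (build_control_key_py key)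

-- ===== LEMMAS AND PROOFS =====

-- weighted sum from starting parity n: the common value of both loops
def pvW : List Char → Nat → Int
  | [], _ => 0
  | c :: t, n => (if n % 2 == 0 then 3 * pvVal c else pvVal c) + pvW t (n + 1)

def pvSum3 (st : List Char × List Char × Nat) : Int :=
  3 * (st.2.1.map pvVal).sum + (st.1.map pvVal).sum

theorem pvBLoop_eq (l : List Char) : ∀ (n : Nat) (s : Int), pvBLoop l n s = s + pvW l n := by
  induction l with
  | nil => intro n s; simp [pvBLoop, pvW]
  | cons c t ih =>
      intro n s
      simp only [pvBLoop, pvW, ih]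
      by_cases h : n % 2 = 0 <;> simp [h] <;> ring

theorem pvALoop_sum (l : List Char) : ∀ (p o : List Char) (n : Nat),
    pvSum3 (pvALoop l (p, o, n)) = pvSum3 (p, o, n) + pvW l n := by
  induction l with
  | nil => intro p o n; simp [pvALoop, pvW]
  | cons c t ih =>
      intro p o n
      by_cases h : n % 2 = 0
      · have h1 : (n + 1) % 2 = 1 := by omega
        simp only [pvALoop, h1]
        rw [if_neg (by simp), ih]
        simp [pvSum3, pvW, h]; ring
      · have h1 : (n + 1) % 2 = 0 := by omega
        simp only [pvALoop, h1]
        rw [if_pos (by simp), ih]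
        simp [pvSum3, pvW, h]; ring

theorem pv_sums_eq (l : List Char) :
    (let st := pvALoop l ([], [], 0);
     (st.2.1.foldl (fun s c => s + pvVal c) 0) * 3 + st.1.foldl (fun s c => s + pvVal c) 0)
    = pvBLoop l 0 0 := by
  have hA := pvALoop_sum l [] [] 0
  have hB := pvBLoop_eq l 0 0
  simp only [pvSum3, List.map_nil, List.sum_nil] at hA
  simp only [PySem.List.foldl_add]
  simp only [hB]
  omega

-- ===== VERDICT (by name: the statement is the Claim_ definition above) =====
theorem build_control_key_py_spec : Claim_equal_build_control_key_py := by
  intro key _ _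
  unfold Spec_build_control_key_py build_control_key_py build_control_key_py_alt
  simp only []
  have h := pv_sums_eq ((PySem.Str.slice? (PySem.Str.replace key " " "") none none (-1)).getD "").toList
  simp only [] at h
  rw [h]
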